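/- GENERATED by mk_final_copies.py from the proof of the farm's unit `__asan_register_globals` (farm:__asan_register_globals.1: Proof.lean) as the
   re-elaboration sweep compiled it — do not edit. -/
/-
  UNIT `__asan_register_globals` (asan_rt.c:165–179; 0x100d60 … 0x100dc0, 28 instructions, a leaf without a frame).

      for (i = 0; i < n; i++) {                                   0x100d83  outer loop head (L.….loop2)
        end  = g[i].beg + g[i].size;                              0x100d88  `cutBody`: the body, `i < n` known
        stop = g[i].beg + g[i].size_with_redzone;
        a    = (end + 7) & ~7;
        if (end & 7) shadow[end >> 3] = end & 7;                  two paths, merged again at the inner head (`AtFill`)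
        while (a < stop) { shadow[a >> 3] = 0xF9; a += 8; }       0x100d7a  inner loop head (L.….loop1)
      }                                                           0x100d7f  `cutNext`: `i++` (`AtNext`)

  The proof follows the code: `to_fill` (0x100d88 → 0x100d7a: the three loads of the descriptor, the rounding, the optional
  partial store), `fill_loop` (the inner loop: `fillMem` grows by one store at its end per round), and the theorem (the outer
  loop: `registerMem` grows by one descriptor at its end per round; the `ret`). The pure facts are in `Lemmas.lean`.
  The table is the concrete one of this image (`Vorbis.Spec.rt`: 6 descriptors at 1217C0H), the descriptors stay abstract
  (`d.OK` is all that is used of them).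
-/
import Asan.CheckWalk
import Vorbis.Spec.Units.asan_register_globals
import Vorbis.Spec.Worked.asan_register_globals_Lemmas

open X86 X86.User Asan Vorbis

set_option maxRecDepth 4000
set_option maxHeartbeats 4000000

namespace Vorbis.Spec.asan_register_globals

/-- 0x100d88 (asan_rt.c:168): the first instruction of the `for` body, after `cmp r8, rsi ; jae` has established `i < n`. -/
abbrev cutBody : Word := 0x100d88

/-- 0x100d7f (asan_rt.c:167): `add r8, 1`, where the inner `while` loop exits to. -/
abbrev cutNext : Word := 0x100d7f

/-- **At the inner loop head for descriptor `d`** (0x100d7a, first arrival): `rax = a`, the end of the global rounded up to a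
granule; `rcx = stop`, the end of the slot; `r8 = i`; the memory is `m`, the memory at the start of this round of the outer
loop, with the partial granule's value stored if the global does not end on a granule — the first argument of `fillMem` in
`registerOne`. Both paths of `if ((end & 7) != 0)` arrive in this description. `u` is the routine's entry state. -/
structure AtFill (u₀ u : State) (i : Nat) (d : GlobalDesc) (m : Mem) (v : State) : Prop where
  rip : v.rip = Vorbis.L.__asan_register_globals.loop1
  rax : v.reg .rax = UInt64.ofNat ((d.beg + d.size + 7) / 8 * 8)
  rcx : v.reg .rcx = UInt64.ofNat (d.beg + d.sizeRz)
  r8 : v.reg .r8 = UInt64.ofNat i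
  kept : RegsKept [.rax, .rcx, .rdx, .r8, .r9] u v
  mem : v.mem = if (d.beg + d.size) % 8 = 0 then m
    else m.write (shadowAddr ((d.beg + d.size) / 8)) (UInt8.ofNat ((d.beg + d.size) % 8))
  code : Mem.EqOn Vorbis.L.textLo Vorbis.L.textHi u₀.mem v.mem
  df : v.flags .df = false
  mxcsr : v.mxcsr = u.mxcsr
  zmm : v.zmm = u.zmm

/-- **After the inner loop for descriptor `d`** (0x100d7f): the memory is `registerOne m d`; `r8 = i` still. -/
structure AtNext (u₀ u : State) (i : Nat) (d : GlobalDesc) (m : Mem) (v : State) : Prop where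
  rip : v.rip = cutNext
  r8 : v.reg .r8 = UInt64.ofNat i
  kept : RegsKept [.rax, .rcx, .rdx, .r8, .r9] u v
  mem : registerOne m d = v.mem
  code : Mem.EqOn Vorbis.L.textLo Vorbis.L.textHi u₀.mem v.mem
  df : v.flags .df = false
  mxcsr : v.mxcsr = u.mxcsr
  zmm : v.zmm = u.zmm

/-- **0x100d88 … 0x100d7a** (asan_rt.c:168–172): the three words of descriptor `i` are loaded (`r1 r2 r3`: what the table holds),
`end`, `stop` and `a` computed, and if `end` is not on a granule the partial value `end & 7` is stored at the shadow byte of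
its granule. Both paths end at the inner loop head in `AtFill`. -/
theorem to_fill {Lay : Layout} (hLay : Lay.hi = 0x1000000) {μ : Microarch} (hμ : UserX.MicroOK μ) {u₀ : State}
    (hcode : HasCodeNat Lay u₀ Vorbis.L.__asan_register_globals.entry Vorbis.Code.code___asan_register_globals.nat
      Vorbis.L.__asan_register_globals.size)
    (u s : State) (i : Nat) (d : GlobalDesc) (hi6 : i < 6) (hd : d.OK) (hrdi : u.reg .rdi = 0x1217c0)
    (w_rip : s.rip = cutBody) (w_r8 : s.reg .r8 = UInt64.ofNat i) (w_kept : RegsKept [.rax, .rcx, .rdx, .r8, .r9] u s)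
    (w_eq : Mem.EqOn Vorbis.L.textLo Vorbis.L.textHi u₀.mem s.mem) (hdf : s.flags .df = false)
    (w_mxcsr : s.mxcsr = u.mxcsr) (w_zmm : s.zmm = u.zmm)
    (r1 : s.mem.readLE (UInt64.ofNat i <<< 6 + 1185728) 8 = d.beg)
    (r2 : s.mem.readLE (UInt64.ofNat i <<< 6 + 1185736) 8 = d.size)
    (r3 : s.mem.readLE (UInt64.ofNat i <<< 6 + 1185744) 8 = d.sizeRz) :
    ReachVia Lay μ WayInv s (AtFill u₀ u i d s.mem) := by
  obtain ⟨hd1, hd2, hd3, hd4, hd5⟩ := hd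
  u_walk hcode [hμ.vendor] until [Vorbis.L.__asan_register_globals.loop1] span [Vorbis.L.textLo, Vorbis.L.textHi] side (v_side)
  · -- `je 100d7a` taken (asan_rt.c:171): the global ends on a granule, nothing stored
    rw [← UInt64.ofNat_add] at w_rax w_rcx hbr_100dab
    rw [test7_ofNat _ (by omega)] at hbr_100dab
    rw [round8_ofNat _ (by omega)] at w_rax
    refine ReachVia.done ⟨w_rip, w_rax, w_rcx, w_r8, w_kept, ?_, w_eq, ?_, w_mxcsr, w_zmm⟩
    · rw [if_pos hbr_100dab]
      exact w_mem
    · rw [w_flags]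
      simp only [X86.User.df_setStatus]
      exact hdf
  · -- 0x100dad … 0x100dbe (asan_rt.c:172): the partial granule gets `end & 7`
    rw [← UInt64.ofNat_add] at w_rax w_rcx hbr_100dab w_mem
    rw [test7_ofNat _ (by omega)] at hbr_100dab
    rw [round8_ofNat _ (by omega)] at w_rax
    rw [and7_ofNat _ (by omega), store_shadow_byte _ _ _ (by omega) (by omega)] at w_mem
    refine ReachVia.done ⟨w_rip, w_rax, w_rcx, w_r8, w_kept, ?_, w_eq, ?_, w_mxcsr, w_zmm⟩
    · rw [if_neg hbr_100dab]
      exact w_mem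
    · rw [w_flags]
      simp only [X86.User.df_setStatus]
      exact hdf

/-- **The inner loop, 0x100d7a … 0x100d7f** (asan_rt.c:174–177 `while (a < stop)`): invariant `rax = a + 8 k ≤ stop` and the memory
is `fillMem m1 (a / 8) F9H k`; measure `stop - rax`. At the exit `a + 8 k = stop`, and the fill is the one of `registerOne`. -/
theorem fill_loop {Lay : Layout} (hLay : Lay.hi = 0x1000000) {μ : Microarch} (hμ : UserX.MicroOK μ) {u₀ : State}
    (hcode : HasCodeNat Lay u₀ Vorbis.L.__asan_register_globals.entry Vorbis.Code.code___asan_register_globals.nat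
      Vorbis.L.__asan_register_globals.size)
    (u : State) (i : Nat) (d : GlobalDesc) (hd : d.OK) (m : Mem) (v : State) (hv : AtFill u₀ u i d m v) :
    ReachVia Lay μ WayInv v (AtNext u₀ u i d m) := by
  obtain ⟨hd1, hd2, hd3, hd4, hd5⟩ := hd
  obtain ⟨w_rip, w_rax, w_rcx, w_r8, w_kept, hm1, w_eq, hdf, w_mxcsr, w_zmm⟩ := hv
  -- the memory the fill starts from: `registerOne`'s first argument of `fillMem`
  generalize hm1def : (if (d.beg + d.size) % 8 = 0 then m
    else m.write (shadowAddr ((d.beg + d.size) / 8)) (UInt8.ofNat ((d.beg + d.size) % 8))) = m1 at hm1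
  -- the loop head: what varies is generalised (`k` rounds done)
  obtain ⟨k, hk, hkle, hfill⟩ : ∃ k : Nat, v.reg .rax = UInt64.ofNat ((d.beg + d.size + 7) / 8 * 8 + 8 * k) ∧
      (d.beg + d.size + 7) / 8 * 8 + 8 * k ≤ d.beg + d.sizeRz ∧
      fillMem m1 ((d.beg + d.size + 7) / 8) 0xF9 k = v.mem :=
    ⟨0, w_rax, by omega, hm1.symm⟩
  clear hm1 w_rax
  u_loop [k] (fun v' => d.beg + d.sizeRz - (v'.reg .rax).toNat) (AtNext u₀ u i d m)
  · u_walk hcode [hμ.vendor] until [Vorbis.L.__asan_register_globals.loop1, cutNext] span [Vorbis.L.textLo, Vorbis.L.textHi] side (v_side)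
    · -- 0x100d68 … 0x100d76 (asan_rt.c:175–176), the back edge: one more F9H, `a = a + 8`
      have hlt : (d.beg + d.size + 7) / 8 * 8 + 8 * k < d.beg + d.sizeRz := by
        rw [UInt64.toNat_ofNat', UInt64.toNat_ofNat'] at hbr_100d7d
        omega
      u_loop_back [k + 1]
      · -- the direction flag: `add` writes status flags only
        rw [w_flags]
        simp only [X86.User.df_setStatus]
        exact hdf
      · -- a = a + 8
        have e : (d.beg + d.size + 7) / 8 * 8 + 8 * (k + 1) = (d.beg + d.size + 7) / 8 * 8 + 8 * k + 8 := by omega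
        rw [w_rax, e]
        exact (UInt64.ofNat_add _ _).symm
      · -- still a ≤ stop: both are multiples of 8
        omega
      · -- one more F9H at the end of the fill
        have e : ((d.beg + d.size + 7) / 8 * 8 + 8 * k) / 8 = (d.beg + d.size + 7) / 8 + k := by omega
        rw [w_mem, ← hfill, fillMem_succ_end, store_shadow_byte _ _ _ (by omega) (by omega), e]
        rfl
      · -- the measure: stop - a
        rw [w_rax]
        u_omega
    · -- `jb` not taken: a = stop, the fill is complete
      u_loop_exit
      have hk' : (d.beg + d.sizeRz) / 8 - (d.beg + d.size + 7) / 8 = k := by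
        rw [UInt64.toNat_ofNat', UInt64.toNat_ofNat'] at hbr_100d7d
        omega
      refine ⟨w_rip, w_r8, w_kept, ?_, w_eq, ?_, w_mxcsr, w_zmm⟩
      · rw [w_mem, ← hfill]
        unfold registerOne
        rw [hm1def, hk']
      · rw [w_flags]
        simp only [X86.User.df_setStatus]
        exact hdf
  · -- the loop's postcondition is the lemma's
    exact ReachVia.done u_post

end Vorbis.Spec.asan_register_globals

open Vorbis.Spec.asan_register_globals

/-- `__asan_register_globals(table, 6)` satisfies its contract `registerGlobalsSpec rt`: the outer loop (`u_loop` at 0x100d83,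
invariant: the memory is `registerMem u.mem (ds.take i)`, measure `6 - i`), whose body is `to_fill`, `fill_loop` and `add r8, 1`;
at the exit `i = 6`, the memory is `registerMem u.mem ds`, and the routine returns. -/
theorem Vorbis.Spec.Worked.asan_register_globals_ok : Vorbis.Spec.asan_register_globals.Statement := by
  intro Lay hLay μ hμ u₀ hcode u ret he hpre
  v_entry he
  obtain ⟨hrdi, hrsi, hdescs, hok⟩ := hpre
  -- the table of this image: 6 descriptors at 1217C0H (the descriptors themselves stay abstract: `ds`)
  have htab : Vorbis.Spec.rt.table = 0x1217c0 := rfl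
  have hlen : Vorbis.Spec.rt.descs.length = 6 := rfl
  rw [htab] at hrdi hdescs
  rw [hlen] at hrsi
  have hrdi' : u.reg .rdi = 0x1217c0 := UInt64.toNat_inj.mp hrdi
  have hrsi' : u.reg .rsi = 6 := UInt64.toNat_inj.mp hrsi
  have hsp8 : (u.reg .rsp).toNat + 8 ≤ 0xC00000 := by omega
  generalize hds : Vorbis.Spec.rt.descs = ds at *
  -- (a fact about the vector registers, so that the walk tracks them: `Keeps` asks for them)
  have hzmm : u.zmm = u.zmm := rfl
  -- 0x100d60 … 0x100d83 (asan_rt.c:167): i = 0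
  u_walk hcode [hμ.vendor] until [Vorbis.L.__asan_register_globals.loop2] span [Vorbis.L.textLo, Vorbis.L.textHi] side (v_side)
  -- the outer loop head: `i` descriptors registered. (The memory equation is written right to left, so that the walk
  -- keeps the loop head's memory as its base and does not rewrite with it.)
  obtain ⟨i, hi, hile, hmem⟩ : ∃ i : Nat, s_100d66.reg .r8 = UInt64.ofNat i ∧ i ≤ 6 ∧
      registerMem u.mem (ds.take i) = s_100d66.mem :=
    ⟨0, w_r8, Nat.zero_le _, w_mem.symm⟩
  have hdf : s_100d66.flags .df = false := by
    rw [w_flags]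
    exact he_df
  replace w_kept := w_kept.mono_all (S' := [.rax, .rcx, .rdx, .r8, .r9]) (by rfl)
  clear w_mem w_flags w_r8
  u_loop [i] (fun v => 6 - (v.reg .r8).toNat)
  -- the return address is still on the stack: a registration writes shadow bytes only
  have hs0 : UInt64.ofNat (s_100d66.mem.readLE (u.reg .rsp) 8) = ret := by
    rw [← hmem, readLE_registerMem _ _ (ok_take hok i) _ _ hsp8]
    exact he_retAddr
  u_walk hcode [hμ.vendor] until [cutBody] span [Vorbis.L.textLo, Vorbis.L.textHi] side (v_side)
  · -- `jae 100dc0` taken, 0x100dc0 `ret` (asan_rt.c:179): i = 6, the whole table is registered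
    refine ReachVia.done (Or.inl ?_)
    have hi6 : i = 6 := by
      rw [UInt64.toNat_ofNat'] at hbr_100d86
      omega
    have hall : s_100dc0.mem = registerMem u.mem ds := by
      rw [w_mem, ← hmem, hi6, List.take_of_length_le (Nat.le_of_eq hlen)]
    v_returned
    · -- the post: the memory is that of the whole table; rax rcx rdx r8 r9 rsp are the only registers written
      show s_100dc0.mem = registerMem u.mem Spec.rt.descs ∧ Keeps clobRegister u s_100dc0
      rw [hds]
      exact ⟨hall, w_kept.mono_all (by rfl), w_zmm, w_mxcsr⟩
    · -- the footprint: the shadow of the six slots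
      rw [hall]
      apply (registerMem_sameExcept u.mem ds hok).mono
      intro w hw a ha1 ha2
      refine ⟨w, ?_, ha1, ha2⟩
      show w ∈ _ :: registerWrites Spec.rt.descs
      rw [hds]
      exact List.mem_cons_of_mem _ hw
  · -- 0x100d88 (asan_rt.c:168): the body of the `for`, i < 6; descriptor `d = ds[i]`
    have hi6 : i < 6 := by
      rw [UInt64.toNat_ofNat'] at hbr_100d86
      omega
    have hilen : i < ds.length := by omega
    have hd : ds[i].OK := hok ds[i] (List.getElem_mem hilen)
    -- the three words of the descriptor, read from the memory of this round: the table is below the shadow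
    obtain ⟨hr1, hr2, hr3⟩ := hdescs i hilen
    have r1 : s_100d86.mem.readLE (UInt64.ofNat i <<< 6 + 1185728) 8 = ds[i].beg := by
      have e : UInt64.ofNat i <<< 6 + 1185728 = UInt64.ofNat (1185728 + 64 * i) := desc_addr i hi6 0
      rw [w_mem, ← hmem, readLE_registerMem _ _ (ok_take hok i) _ _ (by u_omega), e]
      exact hr1
    have r2 : s_100d86.mem.readLE (UInt64.ofNat i <<< 6 + 1185736) 8 = ds[i].size := by
      have e : UInt64.ofNat i <<< 6 + 1185736 = UInt64.ofNat (1185728 + 64 * i + 8) := desc_addr i hi6 8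
      rw [w_mem, ← hmem, readLE_registerMem _ _ (ok_take hok i) _ _ (by u_omega), e]
      exact hr2
    have r3 : s_100d86.mem.readLE (UInt64.ofNat i <<< 6 + 1185744) 8 = ds[i].sizeRz := by
      have e : UInt64.ofNat i <<< 6 + 1185744 = UInt64.ofNat (1185728 + 64 * i + 16) := desc_addr i hi6 16
      rw [w_mem, ← hmem, readLE_registerMem _ _ (ok_take hok i) _ _ (by u_omega), e]
      exact hr3
    have hdf1 : s_100d86.flags .df = false := by
      rw [w_flags]
      simp only [X86.User.df_setStatus]
      exact hdf
    -- 0x100d88 … 0x100d7a, then the inner loop to 0x100d7f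
    refine (to_fill hLay hμ hcode u s_100d86 i ds[i] hi6 hd hrdi' w_rip w_r8 w_kept w_eq hdf1 w_mxcsr w_zmm r1 r2 r3).trans ?_
    intro v1 hv1
    refine (fill_loop hLay hμ hcode u i ds[i] hd s_100d86.mem v1 hv1).trans ?_
    intro v2 hv2
    clear hv1 v1 r1 r2 r3 hdf1 hr1 hr2 hr3
    obtain ⟨h_rip, h_r8, h_kept, hm2, h_eq, hdf2, h_mxcsr, h_zmm⟩ := hv2
    rw [w_mem] at hm2
    try clear w_zmm
    clear w_rip w_r8 w_kept w_mem w_eq w_flags w_mxcsr s_100d86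
    -- 0x100d7f (asan_rt.c:167): i++, back at the outer loop head
    u_walk hcode [hμ.vendor] until [Vorbis.L.__asan_register_globals.loop2] span [Vorbis.L.textLo, Vorbis.L.textHi] side (v_side)
    u_loop_back [i + 1]
    · -- i = i + 1
      rw [w_r8]
      exact (UInt64.ofNat_add _ _).symm
    · omega
    · -- one more descriptor registered
      rw [w_mem, ← hm2, registerMem_take_succ _ _ _ hilen, hmem]
    · -- the direction flag: `add` writes status flags only
      rw [w_flags]
      simp only [X86.User.df_setStatus]
      exact hdf2
    · -- the measure: 6 - i
      rw [w_r8]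
      u_omega
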